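-- pv_equiv track=rewrite | github.com/ding05/intro_to_python | 110119PA.py | area_dict
-- ===== SOURCE A (Python) =====
-- def area_dict(phone_nums):
--     dic = {}
--     keys = []
--     values = []
--     for key, value in phone_nums.items():
--         keys.append(key)
--         values.append(value.split(' ')[0])
--     new_values = []
--     for i in range(0, len(keys)):
--         if values[i] not in new_values:
--             new_values.append(values[i])
--     tuples = []
--     for i in range(0, len(keys)):
--         tuples.append((keys[i], values[i]))
--     temp = []
--     for i in range(0, len(new_values)):
--         temp.append([])
--     new_tuples = temp
--     for i in range(0, len(new_tuples)):
--         new_tuples[i] = []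
--     for i in range(0, len(tuples)):
--         for j in range(0, len(new_values)):
--             if tuples[i][1] == new_values[j]:
--                 new_tuples[j].append(tuples[i][0])
--     for i in range(0, len(new_tuples)):
--         new_tuples[i] = sorted(new_tuples[i])
--     for i in range(0, len(new_tuples)):
--         dic = dict(zip(new_values, new_tuples))
--     return dic
-- ===== SOURCE B (Python) =====
-- def area_dict(phone_nums):
--     groups = {}
--     for key, value in phone_nums.items():
--         groups.setdefault(value.split(' ')[0], []).append(key)
--     return {code: sorted(keys) for code, keys in groups.items()}
-- ===== Notes on version B (the rewrite author's own statement) =====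
-- stated objective: faster
-- what changed: Replaces A's six list-building passes and the nested scan over all (entry, area-code) pairs with one pass that groups keys in a dict of lists keyed by area code, then sorts each group.
import Mathlib
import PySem

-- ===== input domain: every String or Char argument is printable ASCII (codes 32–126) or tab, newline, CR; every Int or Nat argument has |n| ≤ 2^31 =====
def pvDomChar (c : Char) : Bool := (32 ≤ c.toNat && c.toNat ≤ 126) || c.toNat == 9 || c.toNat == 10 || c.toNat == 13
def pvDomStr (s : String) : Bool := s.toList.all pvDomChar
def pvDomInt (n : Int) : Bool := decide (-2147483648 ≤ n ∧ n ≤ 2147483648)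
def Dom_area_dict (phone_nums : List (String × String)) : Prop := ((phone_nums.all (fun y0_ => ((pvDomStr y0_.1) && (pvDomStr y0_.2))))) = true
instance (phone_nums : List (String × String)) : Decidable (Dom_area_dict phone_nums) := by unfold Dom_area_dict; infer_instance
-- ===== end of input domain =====

-- B replaces A's six list-building passes and nested (entry × area-code) scan by one grouping pass
-- into a dict of lists plus a sort of each group (objective: faster).

-- ===== PORT A =====
-- value.split(' ')[0]: sep ' ' is non-empty so split? is always some, and the split list is never
-- empty, so index 0 always exists; pyGetD at 0 is exact here.
def pvFirstWordA (v : String) : String :=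
  PySem.List.pyGetD ((PySem.Str.split? v " ").getD []) 0 ""

def area_dict (phone_nums : List (String × String)) : List (String × List String) :=
  -- dic = {}
  let dic : PySem.Dict String (List String) := PySem.Dict.empty
  -- for key, value in phone_nums.items(): keys.append(key); values.append(value.split(' ')[0])
  let kv := phone_nums.foldl (fun (kv : List String × List String) p =>
      (kv.1 ++ [p.1], kv.2 ++ [pvFirstWordA p.2])) ([], [])
  let keys := kv.1
  let values := kv.2
  -- for i in range(0, len(keys)): if values[i] not in new_values: new_values.append(values[i])
  let new_values := (PySem.List.pyRange 0 (PySem.List.len keys)).foldl (fun nv i =>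
      if nv.contains (PySem.List.pyGetD values i "") then nv
      else nv ++ [PySem.List.pyGetD values i ""]) []
  -- for i in range(0, len(keys)): tuples.append((keys[i], values[i]))
  let tuples := (PySem.List.pyRange 0 (PySem.List.len keys)).foldl (fun t i =>
      t ++ [(PySem.List.pyGetD keys i "", PySem.List.pyGetD values i "")]) []
  -- for i in range(0, len(new_values)): temp.append([])
  let temp := (PySem.List.pyRange 0 (PySem.List.len new_values)).foldl
      (fun (t : List (List String)) _ => t ++ [([] : List String)]) []
  let new_tuples := temp
  -- for i in range(0, len(new_tuples)): new_tuples[i] = []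
  -- (an index i from range(0, len(..)) is nonnegative and in range, so .set i.toNat is exact)
  let new_tuples := (PySem.List.pyRange 0 (PySem.List.len new_tuples)).foldl
      (fun nt i => nt.set i.toNat []) new_tuples
  -- for i in range(0, len(tuples)): for j in range(0, len(new_values)):
  --   if tuples[i][1] == new_values[j]: new_tuples[j].append(tuples[i][0])
  let new_tuples := (PySem.List.pyRange 0 (PySem.List.len tuples)).foldl (fun nt i =>
      (PySem.List.pyRange 0 (PySem.List.len new_values)).foldl (fun nt j =>
        if (PySem.List.pyGetD tuples i ("", "")).2 == PySem.List.pyGetD new_values j "" then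
          nt.set j.toNat (PySem.List.pyGetD nt j [] ++ [(PySem.List.pyGetD tuples i ("", "")).1])
        else nt) nt) new_tuples
  -- for i in range(0, len(new_tuples)): new_tuples[i] = sorted(new_tuples[i])
  let new_tuples := (PySem.List.pyRange 0 (PySem.List.len new_tuples)).foldl
      (fun nt i => nt.set i.toNat (PySem.List.sorted (PySem.List.pyGetD nt i []) id)) new_tuples
  -- for i in range(0, len(new_tuples)): dic = dict(zip(new_values, new_tuples))
  let dic := (PySem.List.pyRange 0 (PySem.List.len new_tuples)).foldl
      (fun _ _ => PySem.Dict.ofList (new_values.zip new_tuples)) dic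
  dic.items

-- ===== PORT B =====
def area_dict_alt (phone_nums : List (String × String)) : List (String × List String) :=
  -- for key, value in phone_nums.items(): groups.setdefault(value.split(' ')[0], []).append(key)
  -- (value.split(' ')[0] inline: sep ' ' is non-empty so split? is always some and index 0 exists)
  let groups := phone_nums.foldl
      (fun (d : PySem.Dict String (List String)) p =>
        d.modify (PySem.List.pyGetD ((PySem.Str.split? p.2 " ").getD []) 0 "") [] (fun ks => ks ++ [p.1])) PySem.Dict.empty
  -- {code: sorted(keys) for code, keys in groups.items()}: group keys are distinct, so this
  -- dict comprehension's items are exactly the mapped items list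
  groups.items.map (fun g => (g.1, PySem.List.sorted g.2 id))

-- ===== PRECONDITION & SPEC =====
def Spec_area_dict (phone_nums : List (String × String)) (out : List (String × List String)) : Prop := out = area_dict_alt phone_nums
instance (phone_nums : List (String × String)) (out : List (String × List String)) : Decidable (Spec_area_dict phone_nums out) := by unfold Spec_area_dict; infer_instance

-- ===== CLAIM (what is proved, stated in full; the proofs are below) =====
def Claim_equal_area_dict : Prop := ∀ (phone_nums : List (String × String)), Dom_area_dict phone_nums → Spec_area_dict phone_nums (area_dict phone_nums)

-- ===== LEMMAS AND PROOFS =====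

-- the common specification both sides are reduced to
def pvVals (l : List (String × String)) : List String := l.map (fun p => pvFirstWordA p.2)

def pvGrp (l : List (String × String)) (c : String) : List String :=
  (l.filter (fun p => pvFirstWordA p.2 == c)).map (fun p => p.1)

def pvSpec (l : List (String × String)) : List (String × List String) :=
  (PySem.Set.ofList (pvVals l)).map (fun c => (c, PySem.List.sorted (pvGrp l c) id))

theorem alt_eq_spec (l : List (String × String)) : area_dict_alt l = pvSpec l := by
  unfold area_dict_alt pvSpec
  have hb : (fun (d : PySem.Dict String (List String)) (p : String × String) =>
      d.modify (PySem.List.pyGetD ((PySem.Str.split? p.2 " ").getD []) 0 "") [] (fun ks => ks ++ [p.1]))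
      = (fun d p => d.modify (pvFirstWordA p.2) [] (fun ks => ks ++ [p.1])) := rfl
  rw [hb]
  set groups := l.foldl (fun (d : PySem.Dict String (List String)) p =>
      d.modify (pvFirstWordA p.2) [] (fun ks => ks ++ [p.1])) PySem.Dict.empty with hg
  have hkeys : groups.keys = PySem.Set.ofList (pvVals l) := by
    rw [hg, PySem.Dict.keys_foldl_modify_key l (fun p => pvFirstWordA p.2) [] (fun _ p ks => ks ++ [p.1]) PySem.Dict.empty]
    rfl
  have hnd : groups.keys.Nodup := by rw [hkeys]; exact PySem.Set.nodup_ofList _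
  have hgetD : ∀ c, groups.getD c [] = pvGrp l c := by
    intro c
    have h := PySem.Dict.getD_foldl_modify_append (l.map (fun p => (pvFirstWordA p.2, p.1))) (PySem.Dict.empty (κ := String) (ν := List String)) c
    rw [List.foldl_map] at h
    rw [hg]
    simp only at h
    rw [h]
    simp [pvGrp, List.filter_map, Function.comp_def]
  show List.map (fun g => (g.1, PySem.List.sorted g.2 id)) groups.items
      = List.map (fun c => (c, PySem.List.sorted (pvGrp l c) id)) (PySem.Set.ofList (pvVals l))
  rw [PySem.Dict.items_eq_map_keys groups hnd [], List.map_map, hkeys]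
  refine List.map_congr_left ?_
  intro c hc
  simp [Function.comp, hgetD c]

theorem pvFoldSet {α : Type} (f : Nat → α → α) (d : α) :
    ∀ (m : Nat) (xs : List α), m ≤ xs.length →
      (List.range m).foldl (fun ys k => ys.set k (f k (ys.getD k d))) xs
        = (xs.take m).mapIdx f ++ xs.drop m := by
  intro m
  induction m with
  | zero => intro xs _; simp
  | succ m ih =>
    intro xs hm
    have hmlt : m < xs.length := by omega
    rw [List.range_succ, List.foldl_append, ih xs (by omega)]
    simp only [List.foldl_cons, List.foldl_nil]
    have hlen1 : ((xs.take m).mapIdx f).length = m := by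
      simp [List.length_mapIdx, List.length_take]; omega
    have hget : ((xs.take m).mapIdx f ++ xs.drop m).getD m d = xs[m] := by
      rw [List.getD_eq_getElem _ _ (by simp [hlen1]; omega)]
      rw [List.getElem_append_right (by omega)]
      simp [hlen1]
    rw [hget]
    have hdrop : xs.drop m = xs[m] :: xs.drop (m + 1) := List.drop_eq_getElem_cons hmlt
    have hset : ((xs.take m).mapIdx f ++ xs.drop m).set m (f m xs[m])
        = (xs.take m).mapIdx f ++ (f m xs[m]) :: xs.drop (m + 1) := by
      rw [List.set_append]
      simp only [hlen1, lt_self_iff_false, if_false, Nat.sub_self]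
      rw [hdrop]
      rfl
    rw [hset]
    have htake : xs.take (m + 1) = xs.take m ++ [xs[m]] := by
      rw [List.take_add_one]
      simp [List.getElem?_eq_getElem hmlt]
    rw [htake, List.mapIdx_concat]
    simp [List.length_take, Nat.min_eq_left (by omega : m ≤ xs.length)]

theorem pvFoldSetFull {α : Type} (f : Nat → α → α) (d : α) (xs : List α) :
    (List.range xs.length).foldl (fun ys k => ys.set k (f k (ys.getD k d))) xs = xs.mapIdx f := by
  rw [pvFoldSet f d xs.length xs le_rfl]
  simp

theorem pvRangeFoldGetD {α β γ : Type} (l : List γ) (g : γ → α) (d : α) (f : β → α → β) (init : β) :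
    (List.range l.length).foldl (fun acc k => f acc ((l.map g).getD k d)) init
      = (l.map g).foldl f init := by
  rw [← List.foldl_map]
  congr 1
  apply List.ext_getElem
  · simp
  · intro i h1 h2
    simp at h1 ⊢
    rw [List.getElem?_eq_getElem (by simpa using h1)]
    simp

theorem pvMapPairRange {γ : Type} (l : List γ) (g1 g2 : γ → String) :
    (List.range l.length).map (fun k => ((l.map g1).getD k "", (l.map g2).getD k ""))
      = l.map (fun p => (g1 p, g2 p)) := by
  apply List.ext_getElem
  · simp
  · intro i h1 h2
    simp at h1 ⊢
    rw [List.getElem?_eq_getElem h1]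
    simp

theorem pvResetReplicate (m n : Nat) :
    (List.range m).foldl (fun (nt : List (List String)) k => nt.set k []) (List.replicate n []) 
      = List.replicate n [] := by
  induction m with
  | zero => simp
  | succ m ih =>
    rw [List.range_succ, List.foldl_append, ih]
    simp [List.set_replicate_self]

theorem pvLinner (nv : List String) (t : String × String) (nt : List (List String))
    (h : nt.length = nv.length) :
    (List.range nv.length).foldl
        (fun nt k => if t.2 == nv.getD k "" then nt.set k (nt.getD k [] ++ [t.1]) else nt) nt
      = nt.mapIdx (fun k g => if t.2 == nv.getD k "" then g ++ [t.1] else g) := by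
  have hb : (fun (nt : List (List String)) k =>
        if t.2 == nv.getD k "" then nt.set k (nt.getD k [] ++ [t.1]) else nt)
      = fun nt k => nt.set k (if t.2 == nv.getD k "" then nt.getD k [] ++ [t.1] else nt.getD k []) := by
    funext nt k
    by_cases hc : (t.2 == nv.getD k "") = true
    · rw [if_pos hc, if_pos hc]
    · rw [if_neg hc, if_neg hc]
      by_cases hk : k < nt.length
      · rw [List.getD_eq_getElem _ _ hk, List.set_getElem_self hk]
      · rw [List.set_eq_of_length_le (by omega)]
  rw [hb, ← h]
  exact pvFoldSetFull (fun k g => if t.2 == nv.getD k "" then g ++ [t.1] else g) [] nt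

theorem pvLouter (nv : List String) :
    ∀ (ps : List (String × String)) (nt : List (List String)), nt.length = nv.length →
      ps.foldl (fun nt t => (List.range nv.length).foldl
          (fun nt k => if t.2 == nv.getD k "" then nt.set k (nt.getD k [] ++ [t.1]) else nt) nt) nt
        = nt.mapIdx (fun k g => g ++ (ps.filter (fun t => t.2 == nv.getD k "")).map (fun t => t.1)) := by
  intro ps
  induction ps with
  | nil =>
    intro nt h
    apply List.ext_getElem
    · simp
    · intro i h1 h2
      simp
  | cons t ps ih =>
    intro nt h
    rw [List.foldl_cons, pvLinner nv t nt h,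
        ih _ (by simp [h]), List.mapIdx_mapIdx]
    congr 1
    funext k g
    by_cases hc : (t.2 == nv.getD k "") = true
    · simp only [Function.comp_apply, List.filter_cons, hc, if_true]
      simp
    · simp only [Function.comp_apply, List.filter_cons, hc]
      simp

theorem pvRepMapIdx {α : Type} (n : Nat) (F : Nat → List String → α) :
    (List.replicate n ([] : List String)).mapIdx F = (List.range n).map (fun k => F k []) := by
  apply List.ext_getElem
  · simp
  · intro i h1 h2
    simp

theorem pvZipSelf (nv : List String) (F : String → List String) :
    nv.zip ((List.range nv.length).map (fun k => F (nv.getD k ""))) = nv.map (fun c => (c, F c)) := by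
  apply List.ext_getElem
  · simp
  · intro i h1 h2
    simp at h1 ⊢
    rw [List.getElem?_eq_getElem h1]
    simp

theorem pvOfListItems (xs : List (String × List String)) (h : (xs.map Prod.fst).Nodup) :
    (PySem.Dict.ofList xs).items = xs := by
  have hc : ∀ a ∈ xs, (PySem.Dict.empty : PySem.Dict String (List String)).contains a.1 = false := by
    intro a _
    simp [pysem]
  have := PySem.Dict.items_foldl_insert_fresh xs Prod.fst Prod.snd PySem.Dict.empty hc h
  simpa [PySem.Dict.ofList, PySem.Dict.update] using this

theorem pvConstFold {α β : Type} (r : List α) (d x : β) :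
    r.foldl (fun _ _ => x) d = if r.isEmpty then d else x := by
  cases r with
  | nil => simp
  | cons a r =>
    simp only [List.isEmpty_cons, List.foldl_cons]
    induction r generalizing x with
    | nil => simp
    | cons b r ih => simpa using ih x


theorem pvSortFold (nt : List (List String)) :
    (List.range nt.length).foldl (fun x y => x.set y (PySem.List.sorted (x.getD y []) id)) nt
      = nt.mapIdx (fun _ g => PySem.List.sorted g id) :=
  pvFoldSetFull (fun _ g => PySem.List.sorted g id) [] nt

set_option maxHeartbeats 1000000 in
theorem a_eq_spec (l : List (String × String)) : area_dict l = pvSpec l := by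
  simp only [area_dict]
  rw [show (List.foldl (fun (kv : List String × List String) p => (kv.1 ++ [p.1], kv.2 ++ [pvFirstWordA p.2])) ([], []) l)
      = (List.foldl (fun ks (p : String × String) => ks ++ [p.1]) [] l,
         List.foldl (fun vs (p : String × String) => vs ++ [pvFirstWordA p.2]) [] l)
    from PySem.List.foldl_prod_mk (fun ks (p : String × String) => ks ++ [p.1]) (fun vs (p : String × String) => vs ++ [pvFirstWordA p.2]) l [] []]
  simp only [PySem.List.foldl_append_singleton_eq_map, List.nil_append]
  simp only [PySem.List.len, List.length_map, PySem.List.pyRange_zero_natCast,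
    List.foldl_map, List.map_map, PySem.List.pyGetD_natCast, Int.toNat_natCast,
    Function.comp_def, List.length_range]
  -- new_values = Set.ofList (pvVals l)
  rw [show (List.foldl (fun x y =>
        if x.contains ((List.map (fun x => pvFirstWordA x.2) l).getD y "") = true then x
        else x ++ [(List.map (fun x => pvFirstWordA x.2) l).getD y ""]) [] (List.range l.length))
      = PySem.Set.ofList (pvVals l) from by
    rw [pvRangeFoldGetD l (fun x => pvFirstWordA x.2) ""
      (fun nv v => if nv.contains v = true then nv else nv ++ [v]) []]
    rfl]
  -- tuples = pairs
  rw [show (List.map (fun x => ((List.map Prod.fst l).getD x "",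
        (List.map (fun x => pvFirstWordA x.2) l).getD x "")) (List.range l.length))
      = l.map (fun p => (p.1, pvFirstWordA p.2)) from
    pvMapPairRange l Prod.fst (fun p => pvFirstWordA p.2)]
  -- temp / reset: replicate
  rw [List.map_const', List.length_range, pvResetReplicate]
  -- grouping loop
  rw [show (List.foldl
        (fun x y =>
          List.foldl
            (fun x y_1 =>
              if (((List.map (fun p => (p.1, pvFirstWordA p.2)) l).getD y ("", "")).2 ==
                    List.getD (PySem.Set.ofList (pvVals l)) y_1 "") = true then
                x.set y_1 (x.getD y_1 [] ++ [((List.map (fun p => (p.1, pvFirstWordA p.2)) l).getD y ("", "")).1])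
              else x)
            x (List.range (List.length (PySem.Set.ofList (pvVals l)))))
        (List.replicate (List.length (PySem.Set.ofList (pvVals l))) []) (List.range l.length))
      = (List.replicate (List.length (PySem.Set.ofList (pvVals l))) ([] : List String)).mapIdx
          (fun k g => g ++ (((List.map (fun p => (p.1, pvFirstWordA p.2)) l).filter
              (fun t => t.2 == List.getD (PySem.Set.ofList (pvVals l)) k "")).map (fun t => t.1))) from by
    have hG := pvRangeFoldGetD (l := l) (g := fun p => (p.1, pvFirstWordA p.2)) (d := ("", ""))
        (f := fun (nt : List (List String)) (t : String × String) => List.foldl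
            (fun (nt : List (List String)) (k : Nat) =>
              if (t.2 == List.getD (PySem.Set.ofList (pvVals l)) k "") = true then
                nt.set k (nt.getD k [] ++ [t.1])
              else nt)
            nt (List.range (List.length (PySem.Set.ofList (pvVals l)))))
        (init := List.replicate (List.length (PySem.Set.ofList (pvVals l))) [])
    rw [hG]
    exact pvLouter (PySem.Set.ofList (pvVals l)) (List.map (fun p => (p.1, pvFirstWordA p.2)) l)
      (List.replicate (List.length (PySem.Set.ofList (pvVals l))) []) (by simp)]
  rw [pvSortFold, List.mapIdx_mapIdx, pvRepMapIdx]
  simp only [List.length_map, List.length_range, Function.comp_apply, List.nil_append]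
  rw [show (List.map
        (fun k => PySem.List.sorted
          (List.map (fun t => t.1)
            (List.filter (fun t => t.2 == List.getD (PySem.Set.ofList (pvVals l)) k "")
              (List.map (fun p => (p.1, pvFirstWordA p.2)) l))) id)
        (List.range (List.length (PySem.Set.ofList (pvVals l)))))
      = (List.range (List.length (PySem.Set.ofList (pvVals l)))).map
          (fun k => (fun c => PySem.List.sorted
            (List.map (fun t => t.1)
              (List.filter (fun t => t.2 == c) (List.map (fun p => (p.1, pvFirstWordA p.2)) l))) id)
            (List.getD (PySem.Set.ofList (pvVals l)) k "")) from rfl]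
  rw [pvZipSelf (PySem.Set.ofList (pvVals l))
      (fun c => PySem.List.sorted
        (List.map (fun t => t.1)
          (List.filter (fun t => t.2 == c) (List.map (fun p => (p.1, pvFirstWordA p.2)) l))) id)]
  rw [pvConstFold]
  by_cases h0 : (PySem.Set.ofList (pvVals l)).length = 0
  · rw [List.length_eq_zero_iff.1 h0]
    simp [pvSpec, List.length_eq_zero_iff.1 h0]
    rfl
  · rw [if_neg (by simp [List.isEmpty_iff, List.range_eq_nil]; exact fun h => h0 (by simp [h]))]
    rw [pvOfListItems _ (by
      simp only [List.map_map]
      have : (Prod.fst ∘ fun c => ((c : String), PySem.List.sorted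
        (List.map (fun t => t.1)
          (List.filter (fun t => t.2 == c) (List.map (fun p => (p.1, pvFirstWordA p.2)) l))) id)) = id := rfl
      rw [this, List.map_id]
      exact PySem.Set.nodup_ofList _)]
    unfold pvSpec
    refine List.map_congr_left ?_
    intro c hc
    congr 1
    simp [pvGrp, List.filter_map, Function.comp_def]

-- ===== VERDICT (by name: the statement is the Claim_ definition above) =====
theorem area_dict_spec : Claim_equal_area_dict := by
  intro l _
  unfold Spec_area_dict
  rw [a_eq_spec, alt_eq_spec]
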